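-- pv_equiv track=rewrite | github.com/lifeomic/phc-sdk-py | phc/easy/util.py | concat_dicts
-- ===== SOURCE A (Python) =====
-- from functools import reduce, wraps
-- from typing import Union, Callable, List
--
-- def prefix_dict_keys(dictionary, prefix: Union[str, int]):
--     if isinstance(prefix, str) and len(prefix) == 0:
--         return dictionary
--
--     return {f"{prefix}_{key}": value for key, value in dictionary.items()}
--
-- def concat_dicts(dicts, prefix: Union[str, int] = ""):
--     "Concatenate list of dictionaries"
--
--     def bump_key_index(key, existing_dict, start=1):
--         "Prefix with _1 until index not in existing dictionary"
--         if key not in existing_dict: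
--             return key
--
--         new_key = f"{key}_{start}"
--         if new_key in existing_dict:
--             return bump_key_index(key, existing_dict, start + 1)
--
--         return new_key
--
--     def reduce_two_dicts(acc, dictionary):
--         return {
--             **acc,
--             **{bump_key_index(k, acc): v for k, v in dictionary.items()},
--         }
--
--     return prefix_dict_keys(reduce(reduce_two_dicts, dicts, {}), prefix)
-- ===== SOURCE B (Python) =====
-- def concat_dicts(dicts, prefix=""):
--     "Concatenate list of dictionaries"
--     result = {}
--     for dictionary in dicts:
--         snapshot = set(result)  # keys present before this dictionary is merged
--         for key, value in dictionary.items():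
--             if key not in snapshot:
--                 target = key
--             else:
--                 n = 1
--                 while f"{key}_{n}" in snapshot:
--                     n += 1
--                 target = f"{key}_{n}"
--             result[target] = value
--     if isinstance(prefix, str) and len(prefix) == 0:
--         return result
--     return {f"{prefix}_{key}": value for key, value in result.items()}
-- ===== Notes on version B (the rewrite author's own statement) =====
-- stated objective: simpler
-- what changed: Replaces the functional reduce over per-dict comprehensions (build a bumped dict, then splice it into the accumulator) and the recursive bump_key_index by a single explicit for-loop that inserts each entry directly into the running result, bumping colliding keys with a while-loop against a per-dict key snapshot.
import Mathlib
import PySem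

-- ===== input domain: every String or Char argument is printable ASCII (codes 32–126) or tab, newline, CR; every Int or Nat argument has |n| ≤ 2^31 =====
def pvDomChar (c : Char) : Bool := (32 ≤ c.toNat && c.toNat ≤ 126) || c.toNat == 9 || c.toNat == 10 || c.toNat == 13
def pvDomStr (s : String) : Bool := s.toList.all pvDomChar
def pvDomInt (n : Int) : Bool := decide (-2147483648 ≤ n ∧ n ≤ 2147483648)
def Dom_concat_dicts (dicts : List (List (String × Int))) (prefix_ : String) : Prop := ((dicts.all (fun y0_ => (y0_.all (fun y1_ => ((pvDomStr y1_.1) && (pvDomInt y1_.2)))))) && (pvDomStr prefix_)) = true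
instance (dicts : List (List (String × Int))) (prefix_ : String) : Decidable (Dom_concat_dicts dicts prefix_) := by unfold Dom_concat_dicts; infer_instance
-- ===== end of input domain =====

-- B replaces A's reduce + recursive bump_key_index by an explicit for-loop inserting each
-- bumped key directly into the running result, with a while-loop bump against a per-dict
-- key snapshot (objective: simpler decomposition, same cost).

-- ===== PORT A =====
-- f"{key}_{n}" (shared string formatting; exact for strings via PySem.Int.toStr)
def pvCand (key : String) (n : Int) : String := key ++ "_" ++ PySem.Int.toStr n

-- bump_key_index: Python's unbounded recursion, made total by a fuel counter.
-- Call sites pass existing.size + 1, which suffices at runtime (the candidate keys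
-- key_1, key_2, … are pairwise distinct strings, so at most existing.size of them
-- can collide); the fallback at fuel 0 is never reached there.
def bumpKeyIndex (key : String) (existing : PySem.Dict String Int) : Nat → Int → String
  | 0, start => pvCand key start
  | fuel+1, start =>
    if existing.contains key = false then key
    else
      let newKey := pvCand key start
      if existing.contains newKey then bumpKeyIndex key existing fuel (start+1)
      else newKey

-- reduce_two_dicts: {**acc, **{bump_key_index(k, acc): v for k, v in dictionary.items()}}
-- ({**acc, **b} is exactly acc.update b.items: acc's entries in place, b's fresh keys appended)
def reduceTwoDicts (acc : PySem.Dict String Int) (dictionary : List (String × Int)) : PySem.Dict String Int :=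
  acc.update (((PySem.Dict.ofList dictionary).items.foldl
      (fun d p => d.insert (bumpKeyIndex p.1 acc (acc.size + 1) 1) p.2) PySem.Dict.empty).items)

-- prefix_dict_keys (prefix is a str here, so the isinstance test is just len(prefix) == 0)
def prefixDictKeys (dictionary : PySem.Dict String Int) (prefix_ : String) : PySem.Dict String Int :=
  if PySem.Str.len prefix_ == 0 then dictionary
  else dictionary.items.foldl (fun d p => d.insert (prefix_ ++ "_" ++ p.1) p.2) PySem.Dict.empty

def concat_dicts (dicts : List (List (String × Int))) (prefix_ : String) : List (String × Int) :=
  (prefixDictKeys (dicts.foldl reduceTwoDicts PySem.Dict.empty) prefix_).items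

-- ===== PORT B =====
-- the while loop `while f"{key}_{n}" in snapshot: n += 1; return f"{key}_{n}"`,
-- made total by a fuel counter; call sites pass snapshot.length + 1 (enough at runtime,
-- as for A's bump: the candidates are pairwise distinct strings).
def bumpWhile (key : String) (snapshot : PySem.Set String) : Nat → Int → String
  | 0, n => pvCand key n
  | fuel+1, n =>
    if snapshot.contains (pvCand key n) then bumpWhile key snapshot fuel (n+1)
    else pvCand key n

-- target key for one entry, bumped against the per-dict snapshot
def targetKey (key : String) (snapshot : PySem.Set String) : String :=
  if snapshot.contains key = false then key
  else bumpWhile key snapshot (snapshot.length + 1) 1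

-- one iteration of B's outer for-loop: snapshot the keys, then insert each entry directly
def stepB (res : PySem.Dict String Int) (dictionary : List (String × Int)) : PySem.Dict String Int :=
  let snapshot := PySem.Set.ofList res.keys
  (PySem.Dict.ofList dictionary).items.foldl
    (fun r p => r.insert (targetKey p.1 snapshot) p.2) res

def concat_dicts_alt (dicts : List (List (String × Int))) (prefix_ : String) : List (String × Int) :=
  let result := dicts.foldl stepB PySem.Dict.empty
  if prefix_ == "" then result.items
  else (result.items.foldl (fun d p => d.insert (prefix_ ++ "_" ++ p.1) p.2) PySem.Dict.empty).items

-- ===== PRECONDITION & SPEC =====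
def Spec_concat_dicts (dicts : List (List (String × Int))) (prefix_ : String) (out : List (String × Int)) : Prop := out = concat_dicts_alt dicts prefix_
instance (dicts : List (List (String × Int))) (prefix_ : String) (out : List (String × Int)) : Decidable (Spec_concat_dicts dicts prefix_ out) := by unfold Spec_concat_dicts; infer_instance

-- ===== CLAIM (what is proved, stated in full; the proofs are below) =====
def Claim_equal_concat_dicts : Prop := ∀ (dicts : List (List (String × Int))) (prefix_ : String), Dom_concat_dicts dicts prefix_ → Spec_concat_dicts dicts prefix_ (concat_dicts dicts prefix_)

-- ===== LEMMAS AND PROOFS =====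

theorem pv_contains_keys (d : PySem.Dict String Int) (c : String) :
    d.keys.contains c = d.contains c := by
  rw [List.contains_eq_mem, PySem.Dict.contains_eq_decide_mem_keys]

theorem pv_bump_eq (key : String) (acc : PySem.Dict String Int)
    (hkey : acc.contains key = true) :
    ∀ (fuel : Nat) (start : Int),
      bumpKeyIndex key acc fuel start = bumpWhile key acc.keys fuel start := by
  intro fuel
  induction fuel with
  | zero => intro start; rfl
  | succ f ih =>
    intro start
    simp only [bumpKeyIndex, bumpWhile, hkey]
    rw [if_neg (by simp), PySem.Set.contains_eq_listContains, pv_contains_keys]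
    split <;> simp [ih]

theorem pv_target_eq (key : String) (acc : PySem.Dict String Int) (hnd : acc.keys.Nodup) :
    targetKey key (PySem.Set.ofList acc.keys) = bumpKeyIndex key acc (acc.size + 1) 1 := by
  unfold targetKey
  rw [PySem.Set.ofList_eq_self_of_nodup _ hnd]
  have hlen : acc.keys.length = acc.size := by
    simp [PySem.Dict.keys, PySem.Dict.size]
  rw [PySem.Set.contains_eq_listContains, pv_contains_keys, hlen]
  cases hk : acc.contains key with
  | false => simp [bumpKeyIndex, hk]
  | true =>
    rw [if_neg (by simp)]
    exact (pv_bump_eq key acc hk _ 1).symm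

theorem pv_insert_comm (d : PySem.Dict String Int) (k k' : String) (v v' : Int)
    (hne : k ≠ k') (hk : d.contains k = true) :
    (d.insert k v).insert k' v' = (d.insert k' v').insert k v := by
  have h1 : (d.insert k v).contains k' = d.contains k' := by
    rw [PySem.Dict.contains_insert]
    simp [Ne.symm hne]
  have h2 : (d.insert k' v').contains k = true := by
    rw [PySem.Dict.contains_insert]
    simp [hk]
  apply PySem.Dict.ext
  cases hc' : d.contains k' with
  | true =>
    simp only [PySem.Dict.items_insert, h1, h2, hc', hk, if_true, List.map_map]
    apply List.map_congr_left
    intro p _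
    by_cases hpk : p.1 = k <;> by_cases hpk' : p.1 = k' <;>
      simp [Function.comp, hpk, hpk', hne, Ne.symm hne]
  | false =>
    simp only [PySem.Dict.items_insert, h1, h2, hc', hk, if_true, Bool.false_eq_true,
      if_false, List.map_append]
    simp [Ne.symm hne]

theorem pv_foldl_insert_of_contains (l : List (String × Int)) :
    ∀ (c : PySem.Dict String Int) (k : String) (v : Int),
      c.contains k = true → k ∉ l.map Prod.fst →
      l.foldl (fun a p => a.insert p.1 p.2) (c.insert k v)
        = (l.foldl (fun a p => a.insert p.1 p.2) c).insert k v := by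
  induction l with
  | nil => intro c k v _ _; rfl
  | cons q t ih =>
    intro c k v hk hnot
    simp only [List.map_cons, List.mem_cons] at hnot
    push Not at hnot
    simp only [List.foldl_cons]
    rw [pv_insert_comm c k q.1 v q.2 hnot.1 hk]
    exact ih (c.insert q.1 q.2) k v
      (by rw [PySem.Dict.contains_insert]; simp [hk]) hnot.2

theorem pv_items_insert_foldl (l : List (String × Int)) :
    ∀ (acc : PySem.Dict String Int) (k : String) (v : Int),
      (l.map Prod.fst).Nodup →
      ((PySem.Dict.mk l).insert k v).items.foldl (fun a p => a.insert p.1 p.2) acc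
        = (l.foldl (fun a p => a.insert p.1 p.2) acc).insert k v := by
  induction l with
  | nil =>
    intro acc k v _
    simp [PySem.Dict.insert, PySem.Dict.contains]
  | cons q t ih =>
    intro acc k v hnd
    simp only [List.map_cons, List.nodup_cons] at hnd
    by_cases hkq : k = q.1
    · subst hkq
      have hcont : (PySem.Dict.mk (q :: t)).contains q.1 = true := by
        simp [PySem.Dict.contains]
      rw [PySem.Dict.items_insert, if_pos hcont]
      have hmap : List.map (fun p => if (p.1 == q.1) = true then (q.1, v) else p) (q :: t)
          = (q.1, v) :: t := by
        simp only [List.map_cons, if_pos (by simp : (q.1 == q.1) = true)]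
        congr 1
        have h1 : ∀ p ∈ t, (if (p.1 == q.1) = true then (q.1, v) else p) = p := by
          intro p hp
          exact if_neg (by simp; exact fun e => hnd.1 (e ▸ List.mem_map_of_mem hp))
        rw [List.map_congr_left h1]; exact List.map_id' t
      rw [hmap]
      simp only [List.foldl_cons]
      rw [← PySem.Dict.insert_insert_self acc q.1 q.2 v]
      exact pv_foldl_insert_of_contains t (acc.insert q.1 q.2) q.1 v
        (PySem.Dict.contains_insert_self _ _ _) hnd.1
    · have hitems : ((PySem.Dict.mk (q :: t)).insert k v).items
          = q :: ((PySem.Dict.mk t).insert k v).items := by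
        have hcc : (PySem.Dict.mk (q :: t)).contains k = (PySem.Dict.mk t).contains k := by
          simp [PySem.Dict.contains, Ne.symm hkq]
        cases hct : (PySem.Dict.mk t).contains k with
        | true =>
          rw [PySem.Dict.items_insert, if_pos (hcc.trans hct),
              PySem.Dict.items_insert, if_pos hct]
          simp [Ne.symm hkq]
        | false =>
          rw [PySem.Dict.items_insert, if_neg (by simp [hcc, hct]),
              PySem.Dict.items_insert, if_neg (by simp [hct])]
          rfl
      rw [hitems]
      simp only [List.foldl_cons]
      exact ih (acc.insert q.1 q.2) k v hnd.2

theorem pv_build_then_merge (f : String × Int → String) (pairs : List (String × Int)) :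
    ∀ (d : PySem.Dict String Int) (acc : PySem.Dict String Int), d.keys.Nodup →
      (pairs.foldl (fun d p => d.insert (f p) p.2) d).items.foldl
          (fun a p => a.insert p.1 p.2) acc
        = pairs.foldl (fun a p => a.insert (f p) p.2)
            (d.items.foldl (fun a p => a.insert p.1 p.2) acc) := by
  induction pairs with
  | nil => intro d acc _; rfl
  | cons p ps ih =>
    intro d acc hnd
    simp only [List.foldl_cons]
    rw [ih (d.insert (f p) p.2) acc (PySem.Dict.nodup_keys_insert d (f p) p.2 hnd)]
    congr 1
    exact pv_items_insert_foldl d.items acc (f p) p.2 hnd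

theorem pv_step_eq (acc : PySem.Dict String Int) (dictionary : List (String × Int))
    (hnd : acc.keys.Nodup) : reduceTwoDicts acc dictionary = stepB acc dictionary := by
  unfold reduceTwoDicts stepB PySem.Dict.update
  rw [pv_build_then_merge (fun p => bumpKeyIndex p.1 acc (acc.size + 1) 1)
        (PySem.Dict.ofList dictionary).items PySem.Dict.empty acc PySem.Dict.nodup_keys_empty]
  simp only [pv_target_eq _ acc hnd]
  rfl

theorem pv_fold_eq (dicts : List (List (String × Int))) :
    ∀ (acc : PySem.Dict String Int), acc.keys.Nodup →
      dicts.foldl reduceTwoDicts acc = dicts.foldl stepB acc := by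
  induction dicts with
  | nil => intro acc _; rfl
  | cons d ds ih =>
    intro acc hnd
    simp only [List.foldl_cons]
    rw [pv_step_eq acc d hnd]
    exact ih (stepB acc d)
      (PySem.Dict.nodup_keys_foldl_insert_key _ _ _ _ hnd)

-- ===== VERDICT (by name: the statement is the Claim_ definition above) =====
theorem concat_dicts_spec : Claim_equal_concat_dicts := by
  intro dicts prefix_ _
  unfold Spec_concat_dicts concat_dicts concat_dicts_alt
  rw [pv_fold_eq dicts PySem.Dict.empty (by simp [PySem.Dict.empty, PySem.Dict.keys])]
  unfold prefixDictKeys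
  by_cases h : prefix_ = ""
  · subst h; simp [PySem.Str.len]
  · have hlen : (PySem.Str.len prefix_ == 0) = false := by
      rw [PySem.Str.len_eq]
      simpa using fun hto => h (String.toList_eq_nil_iff.mp hto)
    rw [hlen, if_neg (by simp)]
    simp [h]
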